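-- pv_equiv track=rewrite | github.com/yesl-kim/algorithm-python | excercies/4. 이분검색 (결정알고리즘)&그리디알고리즘/10. 역수열/answer.py | solution
-- ===== SOURCE A (Python) =====
-- def solution(n, arr):
--     res=[0]*(n)
--     for i in range(n):
--         # 자연수는 i+1
--         # 자연수 앞에 있는 자연수의 개수는 n[i]
--         c=0
--         for j in range(n):
--             if not res[j]==0:
--                 continue
--             if c==arr[i]:
--                 res[j]=i+1
--                 break
--             c+=1
--     return res
-- ===== SOURCE B (Python) =====
-- def solution(n, arr):
--     # Same placement, but the k-th empty slot is found by indexing a shrinking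
--     # list of empty positions (C-level pop) instead of re-scanning res each time.
--     res = [0] * n
--     empties = list(range(n))
--     for i in range(n):
--         k = arr[i]
--         if 0 <= k < len(empties):
--             j = empties.pop(k)
--             res[j] = i + 1
--     return res
-- ===== Notes on version B (the rewrite author's own statement) =====
-- stated objective: faster
-- what changed: Instead of re-scanning res for the arr[i]-th zero on every step, B keeps a shrinking list of the empty positions and takes/pops its k-th element directly, so the inner scan disappears.
import Mathlib
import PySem

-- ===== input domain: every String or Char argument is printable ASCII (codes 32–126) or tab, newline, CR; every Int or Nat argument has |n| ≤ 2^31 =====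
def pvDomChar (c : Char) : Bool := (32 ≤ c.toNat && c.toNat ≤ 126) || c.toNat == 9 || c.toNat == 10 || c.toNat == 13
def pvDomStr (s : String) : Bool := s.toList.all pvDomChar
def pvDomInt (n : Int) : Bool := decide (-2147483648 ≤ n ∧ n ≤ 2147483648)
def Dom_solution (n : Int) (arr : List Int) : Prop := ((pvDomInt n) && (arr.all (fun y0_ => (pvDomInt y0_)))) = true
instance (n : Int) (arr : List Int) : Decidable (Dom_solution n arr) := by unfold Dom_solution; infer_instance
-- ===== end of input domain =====

-- B replaces A's inner re-scan of res with a shrinking list of empty positions,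
-- popping its k-th element directly (constant-factor speedup measured by the check).


-- ===== PORT A =====
-- inner loop of A: scan res left to right, c counts empty (=0) slots seen;
-- at the arr[i]-th empty slot write v and stop.
def aInner (t v : Int) (c : Int) : List Int → List Int
  | [] => []
  | r :: rest =>
    if r = 0 then
      (if c = t then v :: rest else r :: aInner t v (c + 1) rest)
    else r :: aInner t v c rest

def solution (n : Int) (arr : List Int) : List Int :=
  (PySem.List.pyRange 0 n 1).foldl
    (fun res i => aInner (PySem.List.pyGetD arr i 0) (i + 1) 0 res)
    (List.replicate n.toNat 0)

-- ===== PORT B =====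
def solution_alt (n : Int) (arr : List Int) : List Int :=
  let st := (PySem.List.pyRange 0 n 1).foldl
    (fun (st : List Int × List Int) i =>
      let k := PySem.List.pyGetD arr i 0
      if 0 ≤ k ∧ k < (st.2.length : Int) then
        match PySem.List.pop? st.2 k with
        | some (j, rest) => (PySem.List.pySetD st.1 j (i + 1), rest)
        | none => st   -- unreachable: the guard makes pop? succeed
      else st)
    (List.replicate n.toNat (0 : Int), PySem.List.pyRange 0 n 1)
  st.1

-- ===== PRECONDITION & SPEC =====
-- A raises IndexError on arr[i] when 0 < n and n > len(arr); those inputs are excluded.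
def Pre_solution (n : Int) (arr : List Int) : Prop := n ≤ (arr.length : Int) ∨ n ≤ 0
instance (n : Int) (arr : List Int) : Decidable (Pre_solution n arr) := by unfold Pre_solution; infer_instance
def pvWitness_solution : Int × List Int := (3, [1, 1, 0])
def Spec_solution (n : Int) (arr : List Int) (out : List Int) : Prop := out = solution_alt n arr
instance (n : Int) (arr : List Int) (out : List Int) : Decidable (Spec_solution n arr out) := by unfold Spec_solution; infer_instance

-- ===== CLAIM (what is proved, stated in full; the proofs are below) =====
def Claim_equal_solution : Prop := ∀ (n : Int) (arr : List Int), Dom_solution n arr → Pre_solution n arr → Spec_solution n arr (solution n arr)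

-- ===== LEMMAS AND PROOFS =====

-- indices (as Ints) of the zero entries of res, in increasing order
def zIdx : List Int → List Int
  | [] => []
  | r :: rest => if r = 0 then 0 :: (zIdx rest).map (· + 1) else (zIdx rest).map (· + 1)

theorem zIdx_nonneg : ∀ (res : List Int), ∀ x ∈ zIdx res, 0 ≤ x := by
  intro res
  induction res with
  | nil => intro x hx; simp [zIdx] at hx
  | cons r rest ih =>
    intro x hx
    simp only [zIdx] at hx
    split at hx
    · rcases List.mem_cons.mp hx with h | h
      · omega
      · rcases List.mem_map.mp h with ⟨y, hy, rfl⟩; have := ih y hy; omega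
    · rcases List.mem_map.mp hx with ⟨y, hy, rfl⟩; have := ih y hy; omega

theorem aInner_shift (res : List Int) : ∀ (t v c : Int),
    aInner t v c res = aInner (t - c) v 0 res := by
  induction res with
  | nil => intro t v c; simp [aInner]
  | cons r rest ih =>
    intro t v c
    by_cases hr : r = 0
    · subst hr
      by_cases hc : c = t
      · simp [aInner, hc]
      · have h0 : ¬ ((0 : Int) = t - c) := by omega
        simp only [aInner]
        simp only [if_neg hc, if_neg h0, if_true]
        rw [ih t v (c + 1), ih (t - c) v (0 + 1),
          show t - (c + 1) = t - c - (0 + 1) by omega]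
    · simp only [aInner, if_neg hr]
      rw [ih t v c]

-- out-of-range target: A's inner loop changes nothing
theorem aInner_skip (res : List Int) : ∀ (t v : Int),
    (t < 0 ∨ ((zIdx res).length : Int) ≤ t) → aInner t v 0 res = res := by
  induction res with
  | nil => intro t v _; simp [aInner]
  | cons r rest ih =>
    intro t v h
    by_cases hr : r = 0
    · subst hr
      simp only [zIdx, List.length_cons, List.length_map, if_true] at h
      have ht : ¬ ((0 : Int) = t) := by push_cast at h ⊢; omega
      simp [aInner, ht]
      rw [aInner_shift]
      exact ih (t - 1) v (by push_cast at h ⊢; omega)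
    · simp only [zIdx, if_neg hr, List.length_map] at h
      simp [aInner, hr]
      exact ih t v h

-- in-range target: A's inner loop writes v at the t-th zero position,
-- and the new zero-position list is the old one with that entry removed
theorem aInner_hit (res : List Int) : ∀ (t v : Int), 0 ≤ t → v ≠ 0 →
    ∀ (ht : t.toNat < (zIdx res).length),
    aInner t v 0 res = res.set ((zIdx res)[t.toNat]).toNat v ∧
    zIdx (aInner t v 0 res) = (zIdx res).eraseIdx t.toNat := by
  induction res with
  | nil => intro t v _ _ ht; simp [zIdx] at ht
  | cons r rest ih =>
    intro t v h0 hv ht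
    by_cases hr : r = 0
    · subst hr
      by_cases h00 : t = 0
      · subst h00
        simp [aInner, zIdx, hv]
      · have hpos : 0 < t.toNat := by omega
        simp only [zIdx, List.length_cons, List.length_map, if_true] at ht
        obtain ⟨m, hm⟩ : ∃ m : Nat, t.toNat = m + 1 := ⟨t.toNat - 1, by omega⟩
        have ht' : (t - 1).toNat < (zIdx rest).length := by omega
        have hcast : (t - 1).toNat = m := by omega
        have hstep : aInner t v 0 (0 :: rest) = 0 :: aInner (t - 1) v 0 rest := by
          have hne : ¬ ((0 : Int) = t) := by omega
          simp [aInner, hne]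
          rw [aInner_shift]
        obtain ⟨ih1, ih2⟩ := ih (t - 1) v (by omega) hv ht'
        simp only [hcast] at ih1 ih2
        constructor
        · rw [hstep, ih1]
          simp only [zIdx, if_true]
          simp only [hm, List.getElem_cons_succ, List.getElem_map]
          have hz := zIdx_nonneg rest ((zIdx rest)[m]) (List.getElem_mem _)
          rw [show ((zIdx rest)[m] + 1).toNat = (zIdx rest)[m].toNat + 1 by omega,
            List.set_cons_succ]
        · rw [hstep]
          simp only [zIdx, if_true, ih2]
          simp only [hm, List.eraseIdx_cons_succ]
          rw [List.eraseIdx_map]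
    · simp only [zIdx, if_neg hr, List.length_map] at ht
      obtain ⟨ih1, ih2⟩ := ih t v h0 hv ht
      have hstep : aInner t v 0 (r :: rest) = r :: aInner t v 0 rest := by
        simp only [aInner, if_neg hr]
      constructor
      · rw [hstep, ih1]
        simp only [zIdx, if_neg hr, List.getElem_map]
        have hz := zIdx_nonneg rest ((zIdx rest)[t.toNat]) (List.getElem_mem _)
        have : ((zIdx rest)[t.toNat] + 1).toNat = ((zIdx rest)[t.toNat]).toNat + 1 := by omega
        rw [this, List.set_cons_succ]
      · rw [hstep]
        simp only [zIdx, if_neg hr, ih2, List.eraseIdx_map]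

-- the fold invariant: B's second component is the zero-position list of the res both sides share
theorem fold_eq (arr : List Int) (L : List Int) (hL : ∀ i ∈ L, 0 ≤ i) :
    ∀ (res emp : List Int), emp = zIdx res →
    L.foldl (fun res i => aInner (PySem.List.pyGetD arr i 0) (i + 1) 0 res) res =
      (L.foldl (fun (st : List Int × List Int) i =>
        let k := PySem.List.pyGetD arr i 0
        if 0 ≤ k ∧ k < (st.2.length : Int) then
          match PySem.List.pop? st.2 k with
          | some (j, rest) => (PySem.List.pySetD st.1 j (i + 1), rest)
          | none => st
        else st) (res, emp)).1 ∧
    zIdx (L.foldl (fun res i => aInner (PySem.List.pyGetD arr i 0) (i + 1) 0 res) res) =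
      (L.foldl (fun (st : List Int × List Int) i =>
        let k := PySem.List.pyGetD arr i 0
        if 0 ≤ k ∧ k < (st.2.length : Int) then
          match PySem.List.pop? st.2 k with
          | some (j, rest) => (PySem.List.pySetD st.1 j (i + 1), rest)
          | none => st
        else st) (res, emp)).2 := by
  induction L with
  | nil => intro res emp h; simpa using h.symm
  | cons i L ihL =>
    intro res emp h
    subst h
    have hL' : ∀ j ∈ L, 0 ≤ j := fun j hj => hL j (List.mem_cons_of_mem _ hj)
    simp only [List.foldl_cons]
    by_cases hneg : PySem.List.pyGetD arr i 0 < 0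
    · rw [aInner_skip res _ _ (Or.inl hneg), if_neg (by omega)]
      exact ihL hL' res (zIdx res) rfl
    · obtain ⟨m, hm⟩ : ∃ m : Nat, PySem.List.pyGetD arr i 0 = (m : Int) :=
        ⟨(PySem.List.pyGetD arr i 0).toNat, by omega⟩
      rw [hm]
      by_cases hmlen : m < (zIdx res).length
      · have hg : 0 ≤ (m : Int) ∧ (m : Int) < ((zIdx res).length : Int) := ⟨by omega, by omega⟩
        have hpop : PySem.List.pop? (zIdx res) ((m : Nat) : Int)
            = some ((zIdx res)[m], (zIdx res).eraseIdx m) := PySem.List.pop?_natCast (zIdx res) m hmlen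
        have hi : 0 ≤ i := hL i (List.mem_cons_self ..)
        obtain ⟨h1, h2⟩ := aInner_hit res ((m : Nat) : Int) (i + 1) (by omega) (by omega)
          (by simpa using hmlen)
        simp only [Int.toNat_natCast] at h1 h2
        have hjnn : 0 ≤ (zIdx res)[m] := zIdx_nonneg res _ (List.getElem_mem _)
        rw [if_pos hg, hpop]
        simp only
        rw [PySem.List.pySetD_of_nonneg res (i + 1) hjnn]
        rw [← h1]
        exact ihL hL' _ _ h2.symm
      · rw [aInner_skip res _ _ (Or.inr (by omega)), if_neg (by omega)]
        exact ihL hL' res (zIdx res) rfl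

theorem zIdx_replicate (m : Nat) : zIdx (List.replicate m (0 : Int)) = (List.range m).map (fun j : Nat => (j : Int)) := by
  induction m with
  | zero => simp [zIdx]
  | succ m ih =>
    rw [List.replicate_succ]
    simp only [zIdx, if_true, ih]
    rw [List.range_succ_eq_map]
    simp only [List.map_map, List.map_cons, Nat.cast_zero]
    congr 1

-- ===== VERDICT (by name: the statement is the Claim_ definition above) =====
theorem solution_spec : Claim_equal_solution := by
  intro n arr _ _
  unfold Spec_solution solution solution_alt
  have hinit : PySem.List.pyRange 0 n 1 = zIdx (List.replicate n.toNat (0 : Int)) := by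
    rw [zIdx_replicate, PySem.List.pyRange_one]
    simp
  exact (fold_eq arr (PySem.List.pyRange 0 n 1)
    (fun i hi => ((PySem.List.mem_pyRange_one).mp hi).1)
    (List.replicate n.toNat 0) (PySem.List.pyRange 0 n 1) hinit).1
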